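-- pv_equiv track=rewrite | github.com/AP-Skill-Development-Corporation/WebDevelopmentUsingDjango-internship-SRM-University | 15 june 2021/6_cubes_of_average_evennums.py | cubes_of_avg
-- ===== SOURCE A (Python) =====
-- def cubes_of_avg(lv,uv):
--     s = 0
--     c = 0
--     for i in range(lv,uv+1):
--         if i%2 == 0:
--             s = s+i**3
--             c += 1
--     return s//c
-- ===== SOURCE B (Python) =====
-- def cubes_of_avg(lv, uv):
--     # O(1): evens in [lv, uv] are 2k for k in [k0, k1]; sum of cubes = 8*(T(k1)-T(k0-1))
--     k0 = -((-lv) // 2)          # ceil(lv / 2)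
--     k1 = uv // 2                # floor(uv / 2)
--     c = k1 - k0 + 1
--     s = 8 * (tri_sq(k1) - tri_sq(k0 - 1))
--     return s // c
--
-- def tri_sq(n):
--     # (sum of 1..n)^2 = sum of cubes 1..n; telescopes for all integers n
--     return (n * (n + 1) // 2) ** 2
-- ===== Notes on version B (the rewrite author's own statement) =====
-- stated objective: faster
-- what changed: Replaces the O(n) loop over the range by the closed-form telescoping sum of cubes 8*(T(k1)-T(k0-1)) with T(n)=(n(n+1)/2)^2 and count k1-k0+1, then one floor division.
import Mathlib
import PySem

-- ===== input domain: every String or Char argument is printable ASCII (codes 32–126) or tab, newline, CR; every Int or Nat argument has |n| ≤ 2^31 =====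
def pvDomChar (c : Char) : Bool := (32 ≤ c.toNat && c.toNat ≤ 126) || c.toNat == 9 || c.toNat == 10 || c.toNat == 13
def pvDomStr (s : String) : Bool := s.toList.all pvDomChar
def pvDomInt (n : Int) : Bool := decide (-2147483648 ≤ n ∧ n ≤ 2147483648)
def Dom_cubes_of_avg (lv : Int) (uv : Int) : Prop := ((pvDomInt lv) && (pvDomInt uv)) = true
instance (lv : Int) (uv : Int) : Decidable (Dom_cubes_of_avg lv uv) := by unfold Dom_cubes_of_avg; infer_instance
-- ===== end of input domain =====

-- B replaces A's O(n) loop by the closed-form telescoping sum of cubes (8*(T(k1)-T(k0-1)))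
-- and count k1-k0+1 of the even numbers in [lv,uv]; objective: faster (asymptotic).


-- ===== PORT A =====
-- the loop body of A: accumulate (s, c) over i
def cubesStepA (sc : Int × Int) (i : Int) : Int × Int :=
  if PySem.Int.mod i 2 = 0 then (sc.1 + i ^ 3, sc.2 + 1) else sc

def cubes_of_avg (lv : Int) (uv : Int) : Int :=
  let r := (PySem.List.pyRange lv (uv + 1) 1).foldl cubesStepA (0, 0)
  PySem.Int.floordiv r.1 r.2

-- ===== PORT B =====
-- helper tri_sq of Source B: (n*(n+1)//2)**2
def triSq (n : Int) : Int := (PySem.Int.floordiv (n * (n + 1)) 2) ^ 2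

def cubes_of_avg_alt (lv : Int) (uv : Int) : Int :=
  let k0 := -(PySem.Int.floordiv (-lv) 2)
  let k1 := PySem.Int.floordiv uv 2
  let c := k1 - k0 + 1
  let s := 8 * (triSq k1 - triSq (k0 - 1))
  PySem.Int.floordiv s c

-- ===== PRECONDITION & SPEC =====
-- Pre_ excludes exactly the inputs with no even number in [lv, uv]: there Python A
-- divides the count 0 and raises ZeroDivisionError (returns no value).
def Pre_cubes_of_avg (lv : Int) (uv : Int) : Prop :=
  lv ≤ uv ∧ (lv % 2 = 0 ∨ lv + 1 ≤ uv)
instance (lv : Int) (uv : Int) : Decidable (Pre_cubes_of_avg lv uv) := by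
  unfold Pre_cubes_of_avg; infer_instance

def pvWitness_cubes_of_avg : Int × Int := (0, 10)

def Spec_cubes_of_avg (lv : Int) (uv : Int) (out : Int) : Prop := out = cubes_of_avg_alt lv uv
instance (lv : Int) (uv : Int) (out : Int) : Decidable (Spec_cubes_of_avg lv uv out) := by
  unfold Spec_cubes_of_avg; infer_instance

-- ===== CLAIM (what is proved, stated in full; the proofs are below) =====
def Claim_equal_cubes_of_avg : Prop := ∀ (lv : Int) (uv : Int), Dom_cubes_of_avg lv uv → Pre_cubes_of_avg lv uv → Spec_cubes_of_avg lv uv (cubes_of_avg lv uv)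

-- ===== LEMMAS AND PROOFS =====

-- exact halving: 2 divides n*(n+1), so the floor division is exact
lemma floordiv_tri_exact (n : Int) : PySem.Int.floordiv (n * (n + 1)) 2 * 2 = n * (n + 1) := by
  obtain ⟨r, hr⟩ := Int.even_mul_succ_self n
  rw [PySem.Int.floordiv_eq_ediv_of_pos (by norm_num)]
  omega

-- the telescoping step: T(n) - T(n-1) = n^3
lemma triSq_sub (n : Int) : triSq n - triSq (n - 1) = n ^ 3 := by
  have ha := floordiv_tri_exact n
  have hb := floordiv_tri_exact (n - 1)
  set a := PySem.Int.floordiv (n * (n + 1)) 2 with hadef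
  set b := PySem.Int.floordiv ((n - 1) * (n - 1 + 1)) 2 with hbdef
  have hab : a = b + n := by nlinarith
  unfold triSq
  rw [← hadef, ← hbdef, hab]
  linear_combination n * hb

-- closed form of A's loop: with k0 = ceil(lv/2), k1 = floor(uv/2),
-- the loop produces (8*(T(k1)-T(k0-1)), k1-k0+1) whenever lv ≤ uv+1.
lemma loop_closed (lv : Int) : ∀ (n : Nat) (uv : Int), (uv + 1 - lv).toNat = n → lv ≤ uv + 1 →
    (PySem.List.pyRange lv (uv + 1) 1).foldl cubesStepA (0, 0)
      = (8 * (triSq (PySem.Int.floordiv uv 2) - triSq (-(PySem.Int.floordiv (-lv) 2) - 1)),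
         PySem.Int.floordiv uv 2 - (-(PySem.Int.floordiv (-lv) 2)) + 1) := by
  intro n
  induction n with
  | zero =>
    intro uv hn h
    have heq : lv = uv + 1 := by omega
    rw [PySem.List.pyRange_one_eq_nil (by omega)]
    have h1 : PySem.Int.floordiv uv 2 = uv / 2 :=
      PySem.Int.floordiv_eq_ediv_of_pos (by norm_num)
    have h2 : PySem.Int.floordiv (-lv) 2 = (-lv) / 2 :=
      PySem.Int.floordiv_eq_ediv_of_pos (by norm_num)
    have e1 : uv / 2 = -(-lv / 2) - 1 := by omega
    simp only [List.foldl]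
    rw [h1, h2, e1, Prod.ext_iff]
    constructor <;> ring
  | succ n ih =>
    intro uv hn h
    have hle : lv ≤ uv := by omega
    rw [PySem.List.pyRange_one_succ_right hle, List.foldl_append]
    have hrng : PySem.List.pyRange lv uv 1 = PySem.List.pyRange lv ((uv - 1) + 1) 1 := by
      norm_num
    rw [hrng, ih (uv - 1) (by omega) (by omega)]
    have h1 : PySem.Int.floordiv uv 2 = uv / 2 :=
      PySem.Int.floordiv_eq_ediv_of_pos (by norm_num)
    have h1' : PySem.Int.floordiv (uv - 1) 2 = (uv - 1) / 2 :=
      PySem.Int.floordiv_eq_ediv_of_pos (by norm_num)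
    have hm : PySem.Int.mod uv 2 = uv % 2 :=
      PySem.Int.mod_eq_emod_of_pos (by norm_num)
    simp only [List.foldl, cubesStepA, hm]
    by_cases hpar : uv % 2 = 0
    · -- uv even: k1 = (uv-1)/2 + 1, the new term is uv^3 = 8*k1^3
      have hk : PySem.Int.floordiv uv 2 = PySem.Int.floordiv (uv - 1) 2 + 1 := by
        rw [h1, h1']; omega
      have huv : uv = 2 * PySem.Int.floordiv uv 2 := by rw [h1]; omega
      have huv2 : uv = 2 * (PySem.Int.floordiv (uv - 1) 2 + 1) := by rw [← hk]; omega
      set d := PySem.Int.floordiv (uv - 1) 2 with hd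
      have htel' : triSq (d + 1) - triSq d = (d + 1) ^ 3 := by
        have := triSq_sub (d + 1); simpa using this
      simp only [hpar, if_true]
      rw [hk, Prod.ext_iff]
      constructor
      · linear_combination (uv ^ 2 + 2 * (d + 1) * uv + 4 * (d + 1) ^ 2) * huv2 - 8 * htel'
      · ring
    · -- uv odd: nothing changes, and floor(uv/2) = floor((uv-1)/2)
      have hk : PySem.Int.floordiv uv 2 = PySem.Int.floordiv (uv - 1) 2 := by
        rw [h1, h1']; omega
      simp only [if_neg hpar]
      rw [hk]

-- ===== VERDICT (by name: the statement is the Claim_ definition above) =====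
theorem cubes_of_avg_spec : Claim_equal_cubes_of_avg := by
  intro lv uv _ hpre
  unfold Pre_cubes_of_avg at hpre
  unfold Spec_cubes_of_avg cubes_of_avg cubes_of_avg_alt
  rw [loop_closed lv (uv + 1 - lv).toNat uv rfl (by omega)]
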